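-- pv_equiv track=rewrite | github.com/ali2develop/Mafia-TokenUpdater | core/token_fetcher.py | distribute_accounts_across_apis
-- ===== SOURCE A (Python) =====
-- API_URLS = [
--     "https://jwt.tsunstudio.pw/v1/auth/saeed?uid={uid}&password={password}",
--     "https://tsun-ff-jwt-api.onrender.com/v1/auth/saeed?uid={uid}&password={password}",
--     "https://jwt-tsunstudio.onrender.com/v1/auth/saeed?uid={uid}&password={password}"
-- ]
--
-- def distribute_accounts_across_apis(accounts):
--     """
--     Distributes accounts evenly across all 3 APIs.
--     Returns list of (api_url, api_name, accounts_group) tuples.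
--     """
--     total = len(accounts)
--     accounts_per_api = total // len(API_URLS)
--     remainder = total % len(API_URLS)
--
--     distributed = []
--     start_idx = 0
--
--     for i, api_url in enumerate(API_URLS):
--         # Distribute remainder evenly (first APIs get +1 account if remainder exists)
--         group_size = accounts_per_api + (1 if i < remainder else 0)
--         end_idx = start_idx + group_size
--
--         api_name = f"API_{i + 1}"
--         accounts_group = accounts[start_idx:end_idx]
--
--         distributed.append((api_url, api_name, accounts_group))
--         start_idx = end_idx
--
--     return distributed
-- ===== SOURCE B (Python) =====
-- API_URLS = [
--     "https://jwt.tsunstudio.pw/v1/auth/saeed?uid={uid}&password={password}",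
--     "https://tsun-ff-jwt-api.onrender.com/v1/auth/saeed?uid={uid}&password={password}",
--     "https://jwt-tsunstudio.onrender.com/v1/auth/saeed?uid={uid}&password={password}"
-- ]
--
-- def distribute_accounts_across_apis(accounts):
--     """Recursive peeling: each API takes the ceiling share of what is left;
--     no precomputed quotient/remainder and no running offset."""
--     def go(accs, urls, i):
--         if not urls:
--             return []
--         h = -(-len(accs) // len(urls))  # ceil(len(accs) / len(urls))
--         return [(urls[0], f"API_{i}", accs[:h])] + go(accs[h:], urls[1:], i + 1)
--     return go(list(accounts), API_URLS, 1)
-- ===== Notes on version B (the rewrite author's own statement) =====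
-- stated objective: alternative
-- what changed: Replaces the iterative loop with precomputed quotient/remainder and a running start_idx by a recursive peeling that, at each step, gives the current API the ceiling share ceil(len(remaining)/len(remaining_apis)) of the remaining accounts and recurses on the rest; no quotient, remainder or offset is carried.
import Mathlib
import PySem

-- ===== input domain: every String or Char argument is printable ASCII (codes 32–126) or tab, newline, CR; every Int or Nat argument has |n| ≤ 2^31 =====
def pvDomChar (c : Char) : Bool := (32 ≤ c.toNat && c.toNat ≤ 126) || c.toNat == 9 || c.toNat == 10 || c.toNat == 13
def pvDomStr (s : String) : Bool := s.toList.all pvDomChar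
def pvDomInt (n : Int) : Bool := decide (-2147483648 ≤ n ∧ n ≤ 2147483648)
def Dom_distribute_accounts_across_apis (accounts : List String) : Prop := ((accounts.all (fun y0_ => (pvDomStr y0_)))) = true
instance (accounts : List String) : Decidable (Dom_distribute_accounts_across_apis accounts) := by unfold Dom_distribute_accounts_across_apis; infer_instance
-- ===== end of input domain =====

-- B replaces A's stateful quotient/remainder loop by a recursive peeling: each API
-- takes the ceiling share of the remaining accounts and the rest is recursed on
-- (alternative decomposition, same cost).

-- ===== PORT A =====
-- module constant API_URLS (shared data, used by both ports)
def apiUrls : List String :=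
  ["https://jwt.tsunstudio.pw/v1/auth/saeed?uid={uid}&password={password}",
   "https://tsun-ff-jwt-api.onrender.com/v1/auth/saeed?uid={uid}&password={password}",
   "https://jwt-tsunstudio.onrender.com/v1/auth/saeed?uid={uid}&password={password}"]

def distribute_accounts_across_apis (accounts : List String) : List (String × String × List String) :=
  let total : Int := accounts.length
  let accounts_per_api : Int := PySem.Int.floordiv total apiUrls.length
  let remainder : Int := PySem.Int.mod total apiUrls.length
  let st := (PySem.List.enumerate apiUrls).foldl
    (fun (s : List (String × String × List String) × Int) p =>
      let i := p.1
      let api_url := p.2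
      let group_size := accounts_per_api + (if i < remainder then (1 : Int) else 0)
      let end_idx := s.2 + group_size
      let api_name := "API_" ++ PySem.Int.toStr (i + 1)
      let accounts_group := PySem.List.slice accounts (some s.2) (some end_idx)
      (s.1 ++ [(api_url, api_name, accounts_group)], end_idx))
    ([], 0)
  st.1

-- ===== PORT B =====
-- helper 'go' of Source B: structural recursion on the url list;
-- h = -(-len(accs) // len(urls)) is Python's ceiling division, ported literally
def distGo (accs : List String) (urls : List String) (i : Int) : List (String × String × List String) :=
  match urls with
  | [] => []
  | u :: rest =>
    let h : Int := -(PySem.Int.floordiv (-(accs.length : Int)) ((u :: rest).length : Int))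
    [(u, "API_" ++ PySem.Int.toStr i, PySem.List.slice accs none (some h))]
      ++ distGo (PySem.List.slice accs (some h) none) rest (i + 1)

def distribute_accounts_across_apis_alt (accounts : List String) : List (String × String × List String) :=
  distGo accounts apiUrls 1

-- ===== PRECONDITION & SPEC =====
def Spec_distribute_accounts_across_apis (accounts : List String) (out : List (String × String × List String)) : Prop := out = distribute_accounts_across_apis_alt accounts
instance (accounts : List String) (out : List (String × String × List String)) : Decidable (Spec_distribute_accounts_across_apis accounts out) := by unfold Spec_distribute_accounts_across_apis; infer_instance

-- ===== CLAIM (what is proved, stated in full; the proofs are below) =====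
def Claim_equal_distribute_accounts_across_apis : Prop := ∀ (accounts : List String), Dom_distribute_accounts_across_apis accounts → Spec_distribute_accounts_across_apis accounts (distribute_accounts_across_apis accounts)

-- ===== LEMMAS AND PROOFS =====
theorem distribute_eq (accounts : List String) :
    distribute_accounts_across_apis accounts = distribute_accounts_across_apis_alt accounts := by
  unfold distribute_accounts_across_apis distribute_accounts_across_apis_alt
  simp only [distGo, apiUrls, PySem.List.enumerate_cons, PySem.List.enumerate_nil,
    List.foldl_cons, List.foldl_nil, List.nil_append, List.cons_append, List.length_cons,
    List.length_nil]
  norm_num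
  set n := accounts.length with hn
  have h3 : (-(-(n : Int) / 3)) = (((n + 2) / 3 : Nat) : Int) := by omega
  rw [h3, PySem.List.slice_from_natCast, PySem.List.slice_to_natCast, List.length_drop]
  have h2 : (-(-((n - (n + 2) / 3 : Nat) : Int) / 2))
      = (((n - (n + 2) / 3 + 1) / 2 : Nat) : Int) := by omega
  rw [h2, PySem.List.slice_to_natCast, PySem.List.slice_from_natCast]
  have hb1 : ((n : Int) / 3 + (if (0 : Int) < (n : Int) % 3 then 1 else 0))
      = (((n + 2) / 3 : Nat) : Int) := by split_ifs <;> omega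
  have hb2 : ((n : Int) / 3 + (if (1 : Int) < (n : Int) % 3 then 1 else 0))
      = (((n - (n + 2) / 3 + 1) / 2 : Nat) : Int) := by split_ifs <;> omega
  have hb3 : ((n : Int) / 3 + (if (2 : Int) < (n : Int) % 3 then 1 else 0))
      = ((n - (n + 2) / 3 - (n - (n + 2) / 3 + 1) / 2 : Nat) : Int) := by split_ifs <;> omega
  rw [hb1, hb2, hb3, PySem.List.slice_natCast_add]
  refine ⟨by rw [PySem.List.slice_to_natCast], rfl, ?_⟩
  rw [← Nat.cast_add, PySem.List.slice_natCast_add, List.drop_drop]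
  exact List.take_of_length_le (by simp only [List.length_drop, ← hn]; omega)

-- ===== VERDICT (by name: the statement is the Claim_ definition above) =====
theorem distribute_accounts_across_apis_spec : Claim_equal_distribute_accounts_across_apis := by
  intro accounts _
  unfold Spec_distribute_accounts_across_apis
  exact distribute_eq accounts
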